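-- pv_equiv track=rewrite | github.com/hlebiuko/Python_for_DQ | Task4-part1.py | compressing_list_of_dicts_to_one_dict
-- ===== SOURCE A (Python) =====
-- from collections import defaultdict
--
-- def dict_sort(my_dict: dict) -> dict:       # function that gets dict as argument and return sorted dict                    # sorting list of keys from the dict
--     return dict(sorted(my_dict.items()))
--
-- def get_dict_will_all_values_from_list_of_dict(list_of_dicts: list) -> defaultdict:
--     dict_with_all_values = defaultdict(list)
--     for sub_dict in list_of_dicts:  # Iterate threw the list of dicts
--         for key in sub_dict:  # Iterate threw the keys of iterated dict
--             dict_with_all_values[key].append(sub_dict[key])  # append value of the key to existed or created key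
--     return dict_with_all_values
--
-- def compressing_list_of_dicts_to_one_dict(list_of_dicts: list) -> dict:
--     temp_common_dict = {}       # initialization of the temp dict
--     final_dict = {}             # initialization variable for dict that will be returned
--     dict_for_keys_with_duplicates = {}      # initialization of the dict to keep keys with duplicates in different dicts
--     number_of_dict = 0          # variable to hold number of the dict to fill pair key:value
--     dict_with_all_values = get_dict_will_all_values_from_list_of_dict(list_of_dicts)
--     for observed_dict in list_of_dicts:     # loop to go threw list of dicts
--         for observed_key in observed_dict:  # loop to go threw keys in dict
--             if observed_key in temp_common_dict:    # check if selected key is already present in other dicts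
--                 if observed_dict[observed_key] > temp_common_dict[observed_key]:    # if already present value for
--                     # this key is less that current one
--                     temp_common_dict[observed_key] = observed_dict[observed_key]    # then add value to temp dict
--                     dict_for_keys_with_duplicates[observed_key] = number_of_dict    # and save number of the dict
--             else:                                                                   # else
--                 temp_common_dict[observed_key] = observed_dict[observed_key]        # add pair to temp dict
--                 if len(dict_with_all_values[observed_key]) != 1:                    # if key is present more that once
--                     dict_for_keys_with_duplicates[observed_key] = number_of_dict    # save number of the dict
--         number_of_dict += 1                                                         # increase counter of the dicts
--
--     keys_of_temp_dict = list(temp_common_dict.keys())                              # getting list of keys from temp dict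
--     for x in range(len(temp_common_dict)):             # loop to go threw temp dict
--         if keys_of_temp_dict[x] in dict_for_keys_with_duplicates:   # if key is present in several dicts
--             # add pair to final dict with changed key and max value
--             final_dict[str(keys_of_temp_dict[x]) + "_" + str(dict_for_keys_with_duplicates[keys_of_temp_dict[x]])] = temp_common_dict[keys_of_temp_dict[x]]
--         else:       # else
--             final_dict[keys_of_temp_dict[x]] = temp_common_dict[keys_of_temp_dict[x]]   # add pair to final dict
--
--     return dict_sort(final_dict)        # return sorted final dict
-- ===== SOURCE B (Python) =====
-- def compressing_list_of_dicts_to_one_dict(list_of_dicts: list) -> dict: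
--     # Build a table: key -> list of (value, dict_index), in first-appearance key order.
--     table = {}
--     for i, d in enumerate(list_of_dicts):
--         for k, v in d.items():
--             table.setdefault(k, []).append((v, i))
--     # Reduce each key's occurrence list: first tuple attaining the max value.
--     result = {}
--     for k, pairs in table.items():
--         v, i = max(pairs, key=lambda p: p[0])
--         name = k if len(pairs) == 1 else str(k) + "_" + str(i)
--         result[name] = v
--     return dict(sorted(result.items()))
-- ===== Notes on version B (the rewrite author's own statement) =====
-- stated objective: alternative
-- what changed: A's single interleaved pass with running-max and duplicate-index accumulator dicts plus a separate all-values helper is replaced by a build-table-then-reduce decomposition: one pass groups each key's (value, dict_index) occurrences into a dict, a second pass takes the first argmax per key and names the output key.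
import Mathlib
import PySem

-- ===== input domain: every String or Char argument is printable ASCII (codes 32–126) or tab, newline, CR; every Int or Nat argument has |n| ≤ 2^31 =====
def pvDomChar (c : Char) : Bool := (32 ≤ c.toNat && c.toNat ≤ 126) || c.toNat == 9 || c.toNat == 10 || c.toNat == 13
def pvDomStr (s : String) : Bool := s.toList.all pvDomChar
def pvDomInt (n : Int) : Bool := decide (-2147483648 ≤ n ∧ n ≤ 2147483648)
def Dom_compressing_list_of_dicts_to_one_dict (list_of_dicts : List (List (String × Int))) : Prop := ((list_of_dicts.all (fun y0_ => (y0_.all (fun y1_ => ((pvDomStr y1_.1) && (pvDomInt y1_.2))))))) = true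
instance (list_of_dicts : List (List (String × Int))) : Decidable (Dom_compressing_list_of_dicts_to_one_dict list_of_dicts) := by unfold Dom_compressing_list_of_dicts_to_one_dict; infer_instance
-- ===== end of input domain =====

-- B replaces A's incremental running-max/duplicate-index accumulators by a build-table-then-reduce
-- decomposition (key -> list of (value, dict_index), then first-argmax per key); same return value.
-- Inner dicts are modelled as PySem.Dict built from the association list (Python dict: last duplicate wins).

-- ===== PORT A =====
-- helper get_dict_will_all_values_from_list_of_dict
def pv_all_values (list_of_dicts : List (List (String × Int))) : PySem.Dict String (List Int) :=
  list_of_dicts.foldl (fun acc sub =>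
    (PySem.Dict.ofList sub).items.foldl (fun acc p =>
      acc.modify p.1 [] (fun l => l ++ [p.2])) acc) PySem.Dict.empty

def compressing_list_of_dicts_to_one_dict (list_of_dicts : List (List (String × Int))) : List (String × Int) :=
  let allv := pv_all_values list_of_dicts
  -- main loop: temp_common_dict, dict_for_keys_with_duplicates, number_of_dict
  let st := list_of_dicts.foldl
    (fun (s : (PySem.Dict String Int × PySem.Dict String Int) × Int) sub =>
      ((PySem.Dict.ofList sub).items.foldl
        (fun (ts : PySem.Dict String Int × PySem.Dict String Int) p =>
          if ts.1.contains p.1 then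
            if p.2 > ts.1.getD p.1 0 then (ts.1.insert p.1 p.2, ts.2.insert p.1 s.2)
            else ts
          else
            (ts.1.insert p.1 p.2,
             if (allv.getD p.1 []).length ≠ 1 then ts.2.insert p.1 s.2 else ts.2)) s.1,
       s.2 + 1))
    ((PySem.Dict.empty, PySem.Dict.empty), 0)
  -- final loop over the keys of temp_common_dict
  let final := st.1.1.keys.foldl
    (fun (f : PySem.Dict String Int) k =>
      if st.1.2.contains k then
        f.insert (k ++ "_" ++ PySem.Int.toStr (st.1.2.getD k 0)) (st.1.1.getD k 0)
      else f.insert k (st.1.1.getD k 0)) PySem.Dict.empty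
  -- dict_sort: dict(sorted(final_dict.items()))
  (PySem.Dict.ofList (PySem.List.sorted2 final.items (fun p => p.1) (fun p => p.2))).items

-- ===== PORT B =====
def compressing_list_of_dicts_to_one_dict_alt (list_of_dicts : List (List (String × Int))) : List (String × Int) :=
  -- table: key -> list of (value, dict_index) in first-appearance order (setdefault(k, []).append(...))
  let table := (PySem.List.enumerate list_of_dicts).foldl
    (fun (t : PySem.Dict String (List (Int × Int))) e =>
      (PySem.Dict.ofList e.2).items.foldl
        (fun t p => t.modify p.1 [] (fun l => l ++ [(p.2, e.1)])) t) PySem.Dict.empty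
  -- reduce: first tuple attaining the max value per key
  let result := table.items.foldl
    (fun (r : PySem.Dict String Int) kp =>
      match PySem.List.max? kp.2 (fun p => p.1) with
      | some b =>
          r.insert (if kp.2.length == 1 then kp.1 else kp.1 ++ "_" ++ PySem.Int.toStr b.2) b.1
      | none => r) PySem.Dict.empty
  -- dict(sorted(result.items()))
  (PySem.Dict.ofList (PySem.List.sorted2 result.items (fun p => p.1) (fun p => p.2))).items

-- ===== PRECONDITION & SPEC =====
def Spec_compressing_list_of_dicts_to_one_dict (list_of_dicts : List (List (String × Int))) (out : List (String × Int)) : Prop := out = compressing_list_of_dicts_to_one_dict_alt list_of_dicts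
instance (list_of_dicts : List (List (String × Int))) (out : List (String × Int)) : Decidable (Spec_compressing_list_of_dicts_to_one_dict list_of_dicts out) := by unfold Spec_compressing_list_of_dicts_to_one_dict; infer_instance

-- ===== CLAIM (what is proved, stated in full; the proofs are below) =====
def Claim_equal_compressing_list_of_dicts_to_one_dict : Prop := ∀ (list_of_dicts : List (List (String × Int))), Dom_compressing_list_of_dicts_to_one_dict list_of_dicts → Spec_compressing_list_of_dicts_to_one_dict list_of_dicts (compressing_list_of_dicts_to_one_dict list_of_dicts)

-- ===== LEMMAS AND PROOFS =====

-- the flattened enumerated stream of (key, (value, dict_index)) both programs traverse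
def pvFlat (list_of_dicts : List (List (String × Int))) : List (String × Int × Int) :=
  (PySem.List.enumerate list_of_dicts).flatMap
    (fun e => (PySem.Dict.ofList e.2).items.map (fun p => (p.1, p.2, e.1)))

-- the occurrence list of a key: its (value, dict_index) pairs in stream order
def pvOcc (L : List (String × Int × Int)) (k : String) : List (Int × Int) :=
  (L.filter (fun x => x.1 == k)).map (fun x => x.2)

-- A's phase-1 step with the length table it consults
def pvStepAllv (allv : PySem.Dict String (List Int))
    (ts : PySem.Dict String Int × PySem.Dict String Int) (x : String × Int × Int) :
    PySem.Dict String Int × PySem.Dict String Int :=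
  if ts.1.contains x.1 then
    if x.2.1 > ts.1.getD x.1 0 then (ts.1.insert x.1 x.2.1, ts.2.insert x.1 x.2.2)
    else ts
  else
    (ts.1.insert x.1 x.2.1,
     if (allv.getD x.1 []).length ≠ 1 then ts.2.insert x.1 x.2.2 else ts.2)

-- A's phase-1 step, with the global occurrence count abstracted as cnt
def pvStep (cnt : String → Nat)
    (ts : PySem.Dict String Int × PySem.Dict String Int) (x : String × Int × Int) :
    PySem.Dict String Int × PySem.Dict String Int :=
  if ts.1.contains x.1 then
    if x.2.1 > ts.1.getD x.1 0 then (ts.1.insert x.1 x.2.1, ts.2.insert x.1 x.2.2)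
    else ts
  else
    (ts.1.insert x.1 x.2.1, if cnt x.1 ≠ 1 then ts.2.insert x.1 x.2.2 else ts.2)

-- B's table-building step, over the flattened stream
def pvTable (list_of_dicts : List (List (String × Int))) : PySem.Dict String (List (Int × Int)) :=
  (pvFlat list_of_dicts).foldl (fun t q => t.modify q.1 [] (fun l => l ++ [q.2])) PySem.Dict.empty

lemma pvOcc_append (L : List (String × Int × Int)) (x : String × Int × Int) (k : String) :
    pvOcc (L ++ [x]) k = if x.1 == k then pvOcc L k ++ [x.2] else pvOcc L k := by
  by_cases h : x.1 = k
  · simp [pvOcc, List.filter_append, h]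
  · simp [pvOcc, List.filter_append, h]

lemma pvMax?_append_some (l : List (Int × Int)) (x m : Int × Int)
    (h : PySem.List.max? l (fun p => p.1) = some m) :
    PySem.List.max? (l ++ [x]) (fun p => p.1)
      = if m.1 < x.1 then some x else some m := by
  unfold PySem.List.max? at *
  rw [List.foldl_append, h]
  rfl

lemma pvMax?_nil : PySem.List.max? ([] : List (Int × Int)) (fun p => p.1) = none := rfl

lemma pvOfList_append (l : List String) (a : String) :
    PySem.Set.ofList (l ++ [a])
      = if a ∈ PySem.Set.ofList l then PySem.Set.ofList l
        else PySem.Set.ofList l ++ [a] := by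
  have h : PySem.Set.ofList (l ++ [a]) = PySem.Set.add (PySem.Set.ofList l) a := by
    simp [PySem.Set.ofList, List.foldl_append]
  rw [h, PySem.Set.add]
  by_cases hm : a ∈ PySem.Set.ofList l
  · simp [hm]
  · simp [hm]

-- the main invariant of A's phase-1 loop
lemma pvInv (cnt : String → Nat) (P : List (String × Int × Int)) :
    (∀ k, (pvOcc P k).length ≤ cnt k) →
    ((P.foldl (pvStep cnt) (PySem.Dict.empty, PySem.Dict.empty)).1.keys
        = PySem.Set.ofList (P.map (fun x => x.1))) ∧
    (∀ k, (P.foldl (pvStep cnt) (PySem.Dict.empty, PySem.Dict.empty)).1.get? k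
        = (PySem.List.max? (pvOcc P k) (fun p => p.1)).map (fun p => p.1)) ∧
    (∀ k, (P.foldl (pvStep cnt) (PySem.Dict.empty, PySem.Dict.empty)).2.get? k
        = if cnt k = 1 then none
          else (PySem.List.max? (pvOcc P k) (fun p => p.1)).map (fun p => p.2)) := by
  induction P using List.reverseRecOn with
  | nil =>
      intro _
      refine ⟨rfl, fun k => by simp [pvOcc, pvMax?_nil], fun k => ?_⟩
      simp only [pvOcc, List.filter_nil, List.map_nil, pvMax?_nil, Option.map_none,
        List.foldl_nil, PySem.Dict.get?_empty]
      split <;> rfl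
  | append_singleton P x ih =>
      intro Hcnt
      have Hc' : ∀ k, (pvOcc P k).length ≤ cnt k := by
        intro k
        refine le_trans ?_ (Hcnt k)
        rw [pvOcc_append]
        split <;> simp
      obtain ⟨hk, ht, hd⟩ := ih Hc'
      obtain ⟨k0, v, i⟩ := x
      rw [List.foldl_append] at *
      simp only [List.foldl_cons, List.foldl_nil]
      set TS := P.foldl (pvStep cnt) (PySem.Dict.empty, PySem.Dict.empty) with hTS
      by_cases hocc : pvOcc P k0 = []
      · -- first occurrence of k0
        have hnotmem : k0 ∉ P.map (fun x => x.1) := by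
          intro hmem
          obtain ⟨y, hy, hy1⟩ := List.mem_map.mp hmem
          have : y.2 ∈ pvOcc P k0 := by
            simp only [pvOcc, List.mem_map, List.mem_filter]
            exact ⟨y, ⟨hy, by simp [hy1]⟩, rfl⟩
          rw [hocc] at this
          simp at this
        have hcont : TS.1.contains k0 = false := by
          rw [PySem.Dict.contains_eq_isSome_get?, ht k0, hocc, pvMax?_nil]
          rfl
        have hstep : pvStep cnt TS (k0, v, i)
            = (TS.1.insert k0 v, if cnt k0 ≠ 1 then TS.2.insert k0 i else TS.2) := by
          simp [pvStep, hcont]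
        rw [hstep]
        refine ⟨?_, fun k => ?_, fun k => ?_⟩
        · rw [PySem.Dict.keys_insert_of_not_contains _ _ hcont, hk]
          simp only [List.map_append, List.map_cons, List.map_nil]
          rw [pvOfList_append, if_neg (fun h => hnotmem ((PySem.Set.mem_ofList _ _).mp h))]
        · by_cases hkk : k = k0
          · subst hkk
            rw [PySem.Dict.get?_insert, if_pos rfl, pvOcc_append]
            simp [hocc, PySem.List.max?]
          · rw [PySem.Dict.get?_insert, if_neg hkk, pvOcc_append, ht k]
            have : ((k0, v, i).1 == k) = false := by simpa using Ne.symm hkk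
            rw [this]
            simp
        · by_cases hkk : k = k0
          · subst hkk
            rw [pvOcc_append]
            simp only [show ((k, v, i).1 == k) = true by simp, if_true, hocc,
              List.nil_append]
            by_cases hc1 : cnt k = 1
            · simp [hc1, hd k]
            · simp [hc1, PySem.List.max?]
          · have hbeq : ((k0, v, i).1 == k) = false := by simpa using Ne.symm hkk
            rw [pvOcc_append, hbeq]
            simp only [Bool.false_eq_true, if_false]
            by_cases hc1 : cnt k0 = 1
            · simp only [ne_eq, hc1, not_true_eq_false, if_false]
              exact hd k
            · simp only [ne_eq, hc1, not_false_eq_true, if_true]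
              rw [PySem.Dict.get?_insert, if_neg hkk]
              exact hd k
      · -- k0 was seen before: max? is some m
        obtain ⟨m, hm⟩ : ∃ m, PySem.List.max? (pvOcc P k0) (fun p => p.1) = some m := by
          cases hmm : PySem.List.max? (pvOcc P k0) (fun p => p.1) with
          | none => exact absurd ((PySem.List.max?_eq_none_iff _ _).mp hmm) hocc
          | some m => exact ⟨m, rfl⟩
        have hcont : TS.1.contains k0 = true := by
          rw [PySem.Dict.contains_eq_isSome_get?, ht k0, hm]
          rfl
        have hgd : TS.1.getD k0 0 = m.1 := by
          rw [PySem.Dict.getD_eq_get?_getD, ht k0, hm]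
          rfl
        have hcnt2 : cnt k0 ≠ 1 := by
          have := Hcnt k0
          rw [pvOcc_append] at this
          simp only [show ((k0, v, i).1 == k0) = true by simp, if_true,
            List.length_append, List.length_cons, List.length_nil] at this
          have hpos : 0 < (pvOcc P k0).length := List.length_pos_iff.mpr hocc
          omega
        have hmem : k0 ∈ PySem.Set.ofList (P.map (fun x => x.1)) := by
          rw [PySem.Set.mem_ofList]
          obtain ⟨q, hq⟩ : ∃ q, q ∈ pvOcc P k0 := List.exists_mem_of_ne_nil _ hocc
          simp only [pvOcc, List.mem_map, List.mem_filter] at hq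
          obtain ⟨y, ⟨hy, hy1⟩, _⟩ := hq
          exact List.mem_map.mpr ⟨y, hy, by simpa using hy1⟩
        by_cases hvm : m.1 < v
        · -- strict improvement
          have hstep : pvStep cnt TS (k0, v, i)
              = (TS.1.insert k0 v, TS.2.insert k0 i) := by
            simp [pvStep, hcont, hgd, hvm]
          rw [hstep]
          refine ⟨?_, fun k => ?_, fun k => ?_⟩
          · rw [PySem.Dict.keys_insert_of_contains _ _ hcont, hk]
            simp only [List.map_append, List.map_cons, List.map_nil]
            rw [pvOfList_append, if_pos hmem]
          · by_cases hkk : k = k0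
            · subst hkk
              rw [PySem.Dict.get?_insert, if_pos rfl, pvOcc_append]
              simp only [show ((k, v, i).1 == k) = true by simp, if_true]
              rw [pvMax?_append_some _ _ _ hm, if_pos hvm]
              rfl
            · have hbeq : ((k0, v, i).1 == k) = false := by simpa using Ne.symm hkk
              rw [PySem.Dict.get?_insert, if_neg hkk, pvOcc_append, hbeq]
              simp only [Bool.false_eq_true, if_false]
              exact ht k
          · by_cases hkk : k = k0
            · subst hkk
              rw [PySem.Dict.get?_insert, if_pos rfl, pvOcc_append]
              simp only [show ((k, v, i).1 == k) = true by simp, if_true]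
              rw [pvMax?_append_some _ _ _ hm, if_neg hcnt2, if_pos hvm]
              rfl
            · have hbeq : ((k0, v, i).1 == k) = false := by simpa using Ne.symm hkk
              rw [PySem.Dict.get?_insert, if_neg hkk, pvOcc_append, hbeq]
              simp only [Bool.false_eq_true, if_false]
              exact hd k
        · -- no improvement: state unchanged
          have hstep : pvStep cnt TS (k0, v, i) = TS := by
            simp [pvStep, hcont, hgd, hvm]
          rw [hstep]
          refine ⟨?_, fun k => ?_, fun k => ?_⟩
          · rw [hk]
            simp only [List.map_append, List.map_cons, List.map_nil]
            rw [pvOfList_append, if_pos hmem]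
          · by_cases hkk : k = k0
            · subst hkk
              rw [pvOcc_append]
              simp only [show ((k, v, i).1 == k) = true by simp, if_true]
              rw [pvMax?_append_some _ _ _ hm, if_neg hvm, ht k, hm]
            · have hbeq : ((k0, v, i).1 == k) = false := by simpa using Ne.symm hkk
              rw [pvOcc_append, hbeq]
              simp only [Bool.false_eq_true, if_false]
              exact ht k
          · by_cases hkk : k = k0
            · subst hkk
              rw [pvOcc_append]
              simp only [show ((k, v, i).1 == k) = true by simp, if_true]
              rw [pvMax?_append_some _ _ _ hm, if_neg hvm, hd k, hm]
            · have hbeq : ((k0, v, i).1 == k) = false := by simpa using Ne.symm hkk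
              rw [pvOcc_append, hbeq]
              simp only [Bool.false_eq_true, if_false]
              exact hd k

-- A's counted nested loop is the fold of a step over the enumerated stream
lemma pvA_flatten (step : (PySem.Dict String Int × PySem.Dict String Int) → (String × Int × Int) → (PySem.Dict String Int × PySem.Dict String Int)) :
    ∀ (lds : List (List (String × Int)))
      (s0 : PySem.Dict String Int × PySem.Dict String Int) (n : Int),
    lds.foldl
      (fun (s : (PySem.Dict String Int × PySem.Dict String Int) × Int) sub =>
        ((PySem.Dict.ofList sub).items.foldl (fun ts p => step ts (p.1, p.2, s.2)) s.1, s.2 + 1))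
      (s0, n)
    = (((PySem.List.enumerate lds n).flatMap
          (fun e => (PySem.Dict.ofList e.2).items.map (fun p => (p.1, p.2, e.1)))).foldl step s0,
       n + lds.length) := by
  intro lds
  induction lds with
  | nil => intro s0 n; simp [PySem.List.enumerate]
  | cons hd tl ih =>
      intro s0 n
      simp only [List.foldl_cons, PySem.List.enumerate, List.flatMap_cons, List.foldl_append,
        List.foldl_map, ih, List.length_cons]
      rw [Prod.mk.injEq]
      refine ⟨rfl, by push_cast; ring⟩

-- the projection of the enumerated stream is the plain flattened stream
lemma pvProj : ∀ (lds : List (List (String × Int))) (n : Int),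
    ((PySem.List.enumerate lds n).flatMap
        (fun e => (PySem.Dict.ofList e.2).items.map (fun p => (p.1, p.2, e.1)))).map
      (fun x => (x.1, x.2.1))
    = lds.flatMap (fun sub => (PySem.Dict.ofList sub).items) := by
  intro lds
  induction lds with
  | nil => intro n; simp [PySem.List.enumerate]
  | cons hd tl ih =>
      intro n
      simp only [PySem.List.enumerate, List.flatMap_cons, List.map_append, ih (n + 1)]
      simp [Function.comp_def]

-- pv_all_values as a fold over the plain flattened stream
lemma pvAllv_flat (lds : List (List (String × Int))) :
    pv_all_values lds
      = (lds.flatMap (fun sub => (PySem.Dict.ofList sub).items)).foldl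
          (fun acc p => acc.modify p.1 [] (fun l => l ++ [p.2])) PySem.Dict.empty := by
  simp only [pv_all_values, List.foldl_flatMap]

-- the length A consults equals the occurrence count in the enumerated stream
lemma pvCnt_eq (lds : List (List (String × Int))) (k : String) :
    ((pv_all_values lds).getD k []).length = (pvOcc (pvFlat lds) k).length := by
  rw [pvAllv_flat, PySem.Dict.getD_foldl_modify_append]
  simp only [PySem.Dict.getD_empty, List.nil_append, List.length_map, pvOcc]
  rw [← pvProj lds 0, List.filter_map]
  simp
  rfl

-- A's step is B's abstracted step for the global count function
lemma pvStep_eq (lds : List (List (String × Int))) :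
    pvStepAllv (pv_all_values lds) = pvStep (fun k => (pvOcc (pvFlat lds) k).length) := by
  funext ts x
  simp [pvStepAllv, pvStep, pvCnt_eq]

-- the table's entry for k is exactly the occurrence list of k
lemma pvTable_getD (lds : List (List (String × Int))) (k : String) :
    (pvTable lds).getD k [] = pvOcc (pvFlat lds) k := by
  rw [pvTable, PySem.Dict.getD_foldl_modify_append]
  simp [pvOcc]

lemma pvTable_keys (lds : List (List (String × Int))) :
    (pvTable lds).keys = PySem.Set.ofList ((pvFlat lds).map (fun x => x.1)) := by
  rw [pvTable, PySem.Dict.keys_foldl_modify_key (pvFlat lds) (fun q => q.1) []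
    (fun t q => (fun l => l ++ [q.2]))]
  rfl

lemma pvTable_nodup (lds : List (List (String × Int))) : (pvTable lds).keys.Nodup := by
  rw [pvTable]
  exact PySem.Dict.nodup_keys_foldl_modify_key (pvFlat lds) (fun q => q.1) []
    (fun t q => (fun l => l ++ [q.2])) PySem.Dict.empty (by simp)

-- canonical intermediate forms shared by the two proofs
def pvSt (lds : List (List (String × Int))) :
    PySem.Dict String Int × PySem.Dict String Int :=
  (pvFlat lds).foldl (pvStep (fun k => (pvOcc (pvFlat lds) k).length))
    (PySem.Dict.empty, PySem.Dict.empty)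

def pvResult (lds : List (List (String × Int))) : PySem.Dict String Int :=
  (PySem.Set.ofList ((pvFlat lds).map (fun x => x.1))).foldl
    (fun (r : PySem.Dict String Int) k =>
      match PySem.List.max? (pvOcc (pvFlat lds) k) (fun p => p.1) with
      | some b =>
          r.insert (if (pvOcc (pvFlat lds) k).length == 1 then k
                    else k ++ "_" ++ PySem.Int.toStr b.2) b.1
      | none => r) PySem.Dict.empty

-- A's phase-1 loop, verbatim, equals the canonical fold
lemma pvA_st (lds : List (List (String × Int))) :
    (lds.foldl
      (fun (s : (PySem.Dict String Int × PySem.Dict String Int) × Int) sub =>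
        ((PySem.Dict.ofList sub).items.foldl
          (fun (ts : PySem.Dict String Int × PySem.Dict String Int) p =>
            if ts.1.contains p.1 then
              if p.2 > ts.1.getD p.1 0 then (ts.1.insert p.1 p.2, ts.2.insert p.1 s.2)
              else ts
            else
              (ts.1.insert p.1 p.2,
               if ((pv_all_values lds).getD p.1 []).length ≠ 1 then ts.2.insert p.1 s.2 else ts.2)) s.1,
         s.2 + 1))
      ((PySem.Dict.empty, PySem.Dict.empty), 0))
    = (pvSt lds, 0 + (lds.length : Int)) := by
  have h := pvA_flatten (pvStepAllv (pv_all_values lds)) lds (PySem.Dict.empty, PySem.Dict.empty) 0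
  have h3 : ((PySem.List.enumerate lds 0).flatMap
        (fun e => (PySem.Dict.ofList e.2).items.map (fun p => (p.1, p.2, e.1)))).foldl
        (pvStepAllv (pv_all_values lds)) (PySem.Dict.empty, PySem.Dict.empty) = pvSt lds := by
    rw [pvStep_eq lds]
    rfl
  exact h.trans (by rw [h3])

-- B's table loop, verbatim, equals the canonical table
lemma pvB_table (lds : List (List (String × Int))) :
    ((PySem.List.enumerate lds).foldl
      (fun (t : PySem.Dict String (List (Int × Int))) e =>
        (PySem.Dict.ofList e.2).items.foldl
          (fun t p => t.modify p.1 [] (fun l => l ++ [(p.2, e.1)])) t) PySem.Dict.empty)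
    = pvTable lds := by
  rw [pvTable, pvFlat, List.foldl_flatMap]
  simp only [List.foldl_map]

-- B's reduce loop, over the canonical table, equals the canonical result
lemma pvB_result (lds : List (List (String × Int))) :
    ((pvTable lds).items.foldl
      (fun (r : PySem.Dict String Int) kp =>
        match PySem.List.max? kp.2 (fun p => p.1) with
        | some b =>
            r.insert (if kp.2.length == 1 then kp.1 else kp.1 ++ "_" ++ PySem.Int.toStr b.2) b.1
        | none => r) PySem.Dict.empty)
    = pvResult lds := by
  rw [PySem.Dict.items_eq_map_keys (pvTable lds) (pvTable_nodup lds) ([] : List (Int × Int)),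
    List.foldl_map, pvTable_keys, pvResult]
  refine PySem.List.foldl_congr_mem _ _ _ _ ?_
  intro acc x hx
  simp only [pvTable_getD]

-- ===== VERDICT (by name: the statement is the Claim_ definition above) =====
theorem compressing_list_of_dicts_to_one_dict_spec : Claim_equal_compressing_list_of_dicts_to_one_dict := by
  intro lds _
  show compressing_list_of_dicts_to_one_dict lds = compressing_list_of_dicts_to_one_dict_alt lds
  obtain ⟨hk, ht, hd⟩ :=
    pvInv (fun k => (pvOcc (pvFlat lds) k).length) (pvFlat lds) (fun k => le_rfl)
  have hkA : (pvSt lds).1.keys = PySem.Set.ofList ((pvFlat lds).map (fun x => x.1)) := hk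
  have htA : ∀ k, (pvSt lds).1.get? k
      = (PySem.List.max? (pvOcc (pvFlat lds) k) (fun p => p.1)).map (fun p => p.1) := ht
  have hdA : ∀ k, (pvSt lds).2.get? k
      = if (pvOcc (pvFlat lds) k).length = 1 then none
        else (PySem.List.max? (pvOcc (pvFlat lds) k) (fun p => p.1)).map (fun p => p.2) := hd
  unfold compressing_list_of_dicts_to_one_dict compressing_list_of_dicts_to_one_dict_alt
  dsimp only
  rw [pvA_st lds, pvB_table lds, pvB_result lds]
  dsimp only
  rw [hkA]
  unfold pvResult
  congr 1
  congr 1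
  congr 1
  congr 1
  refine PySem.List.foldl_congr_mem _ _ _ _ ?_
  intro acc k hkm
  have hkL : k ∈ (pvFlat lds).map (fun x => x.1) := (PySem.Set.mem_ofList _ _).mp hkm
  obtain ⟨y, hy, hy1⟩ := List.mem_map.mp hkL
  have hocc : pvOcc (pvFlat lds) k ≠ [] := by
    intro hnil
    have hmem2 : y.2 ∈ pvOcc (pvFlat lds) k := by
      simp only [pvOcc, List.mem_map, List.mem_filter]
      exact ⟨y, ⟨hy, by simp [hy1]⟩, rfl⟩
    rw [hnil] at hmem2
    simp at hmem2
  obtain ⟨b, hb⟩ : ∃ b, PySem.List.max? (pvOcc (pvFlat lds) k) (fun p => p.1) = some b := by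
    cases hmm : PySem.List.max? (pvOcc (pvFlat lds) k) (fun p => p.1) with
    | none => exact absurd ((PySem.List.max?_eq_none_iff _ _).mp hmm) hocc
    | some b => exact ⟨b, rfl⟩
  have hgd1 : (pvSt lds).1.getD k 0 = b.1 := by
    rw [PySem.Dict.getD_eq_get?_getD, htA k, hb]
    rfl
  simp only [hb]
  by_cases hc1 : (pvOcc (pvFlat lds) k).length = 1
  · have hdk : (pvSt lds).2.get? k = none := by rw [hdA k, if_pos hc1]
    have hcont : (pvSt lds).2.contains k = false := by
      rw [PySem.Dict.contains_eq_isSome_get?, hdk]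
      rfl
    rw [hcont]
    simp [hgd1, hc1]
  · have hdk : (pvSt lds).2.get? k = some b.2 := by
      rw [hdA k, if_neg hc1, hb]
      rfl
    have hcont : (pvSt lds).2.contains k = true := by
      rw [PySem.Dict.contains_eq_isSome_get?, hdk]
      rfl
    have hgd2 : (pvSt lds).2.getD k 0 = b.2 := by
      rw [PySem.Dict.getD_eq_get?_getD, hdk]
      rfl
    have hne : ((pvOcc (pvFlat lds) k).length == 1) = false := by simpa using hc1
    rw [hcont]
    simp [hgd1, hgd2, hne]
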